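-- pv_equiv track=rewrite | github.com/familiarcat/alex-ai-optimized-monorepo | src/agile_sprint_dashboard_system.py | _assign_crew_to_tasks
-- ===== SOURCE A (Python) =====
-- from typing import Dict, List, Any, Optional
--
-- def _assign_crew_to_tasks(tasks: List[str], crew_assignments: Dict[str, str]) -> Dict[str, List[str]]:
--     """Assign crew members to tasks based on their roles"""
--     task_assignments = {}
--
--     for task in tasks:
--         # Determine which crew member is best suited for this task
--         if "planning" in task.lower() or "goal" in task.lower():
--             task_assignments[task] = ["captain_picard"]
--         elif "development" in task.lower() or "implementation" in task.lower():
--             task_assignments[task] = ["commander_riker", "geordi_la_forge"]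
--         elif "testing" in task.lower() or "quality" in task.lower():
--             task_assignments[task] = ["lieutenant_worf", "counselor_troi"]
--         elif "analytics" in task.lower() or "monitoring" in task.lower():
--             task_assignments[task] = ["commander_data", "dr_crusher"]
--         elif "communication" in task.lower() or "marketing" in task.lower():
--             task_assignments[task] = ["lieutenant_uhura"]
--         elif "revenue" in task.lower() or "monetization" in task.lower():
--             task_assignments[task] = ["quark"]
--         elif "alex ai" in task.lower() or "knowledge" in task.lower():
--             task_assignments[task] = ["captain_picard", "commander_data", "geordi_la_forge"]
--         else:
--             # Default assignment
--             task_assignments[task] = ["commander_riker"]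
--
--     return task_assignments
-- ===== SOURCE B (Python) =====
-- RULES = [
--     (("planning", "goal"), ["captain_picard"]),
--     (("development", "implementation"), ["commander_riker", "geordi_la_forge"]),
--     (("testing", "quality"), ["lieutenant_worf", "counselor_troi"]),
--     (("analytics", "monitoring"), ["commander_data", "dr_crusher"]),
--     (("communication", "marketing"), ["lieutenant_uhura"]),
--     (("revenue", "monetization"), ["quark"]),
--     (("alex ai", "knowledge"), ["captain_picard", "commander_data", "geordi_la_forge"]),
-- ]
--
-- def _assign_crew_to_tasks(tasks, crew_assignments):
--     # Seed every task with the default crew, then sweep the rules in REVERSE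
--     # priority order, overwriting matching tasks; the last overwrite (highest
--     # priority rule) wins, so each task ends on its first matching rule.
--     task_assignments = {task: ["commander_riker"] for task in tasks}
--     for keywords, crew in reversed(RULES):
--         for task in tasks:
--             t = task.lower()
--             if any(k in t for k in keywords):
--                 task_assignments[task] = list(crew)
--     return task_assignments
-- ===== Notes on version B (the rewrite author's own statement) =====
-- stated objective: alternative
-- what changed: Replaces the per-task first-match if/elif chain with a staged multi-pass sweep: every task is seeded with the default crew, then the rule table is applied in reverse priority order as whole-list overwrite passes, so the highest-priority matching rule wins by last write.
import Mathlib
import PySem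

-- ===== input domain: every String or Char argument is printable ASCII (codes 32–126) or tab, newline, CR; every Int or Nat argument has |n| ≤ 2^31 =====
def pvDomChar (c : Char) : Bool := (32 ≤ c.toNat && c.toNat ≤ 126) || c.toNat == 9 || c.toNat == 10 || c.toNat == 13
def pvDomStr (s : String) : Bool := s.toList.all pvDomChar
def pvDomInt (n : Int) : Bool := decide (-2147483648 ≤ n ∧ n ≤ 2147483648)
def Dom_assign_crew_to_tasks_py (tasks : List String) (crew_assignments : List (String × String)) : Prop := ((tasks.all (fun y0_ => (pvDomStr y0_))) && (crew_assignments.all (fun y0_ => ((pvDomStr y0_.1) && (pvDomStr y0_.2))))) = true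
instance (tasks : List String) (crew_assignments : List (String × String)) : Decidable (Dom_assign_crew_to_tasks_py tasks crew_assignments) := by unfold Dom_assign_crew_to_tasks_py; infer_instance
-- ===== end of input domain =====

-- B replaces A's per-task first-match if/elif chain by a staged sweep: seed every task
-- with the default crew, then apply the rule table in REVERSE priority order as whole-list
-- overwrite passes, so the highest-priority matching rule wins by last write (alternative).

-- ===== PORT A =====
-- literal transliteration of A's if/elif chain inside the loop; 'task.lower()' recomputed per test as in A
def assign_crew_to_tasks_py (tasks : List String) (crew_assignments : List (String × String)) : List (String × List String) :=
  (tasks.foldl (fun d task =>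
    if PySem.Str.isIn "planning" (PySem.Str.lower task) || PySem.Str.isIn "goal" (PySem.Str.lower task) then
      d.insert task ["captain_picard"]
    else if PySem.Str.isIn "development" (PySem.Str.lower task) || PySem.Str.isIn "implementation" (PySem.Str.lower task) then
      d.insert task ["commander_riker", "geordi_la_forge"]
    else if PySem.Str.isIn "testing" (PySem.Str.lower task) || PySem.Str.isIn "quality" (PySem.Str.lower task) then
      d.insert task ["lieutenant_worf", "counselor_troi"]
    else if PySem.Str.isIn "analytics" (PySem.Str.lower task) || PySem.Str.isIn "monitoring" (PySem.Str.lower task) then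
      d.insert task ["commander_data", "dr_crusher"]
    else if PySem.Str.isIn "communication" (PySem.Str.lower task) || PySem.Str.isIn "marketing" (PySem.Str.lower task) then
      d.insert task ["lieutenant_uhura"]
    else if PySem.Str.isIn "revenue" (PySem.Str.lower task) || PySem.Str.isIn "monetization" (PySem.Str.lower task) then
      d.insert task ["quark"]
    else if PySem.Str.isIn "alex ai" (PySem.Str.lower task) || PySem.Str.isIn "knowledge" (PySem.Str.lower task) then
      d.insert task ["captain_picard", "commander_data", "geordi_la_forge"]
    else
      d.insert task ["commander_riker"]) PySem.Dict.empty).items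

-- ===== PORT B =====
-- the RULES table of Source B
def pvRules : List (List String × List String) :=
  [ (["planning", "goal"], ["captain_picard"]),
    (["development", "implementation"], ["commander_riker", "geordi_la_forge"]),
    (["testing", "quality"], ["lieutenant_worf", "counselor_troi"]),
    (["analytics", "monitoring"], ["commander_data", "dr_crusher"]),
    (["communication", "marketing"], ["lieutenant_uhura"]),
    (["revenue", "monetization"], ["quark"]),
    (["alex ai", "knowledge"], ["captain_picard", "commander_data", "geordi_la_forge"]) ]

-- Source B's inner test: any keyword of the rule occurs in the lowered task
def pvP (r : List String × List String) (task : String) : Bool :=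
  r.1.any (fun k => PySem.Str.isIn k (PySem.Str.lower task))

-- Source B: seed all tasks with the default crew, then sweep reversed(RULES), overwriting matches
def assign_crew_to_tasks_py_alt (tasks : List String) (crew_assignments : List (String × String)) : List (String × List String) :=
  (pvRules.reverse.foldl
    (fun d r => tasks.foldl (fun d task => if pvP r task then d.insert task r.2 else d) d)
    (tasks.foldl (fun d task => d.insert task ["commander_riker"]) PySem.Dict.empty)).items

-- ===== PRECONDITION & SPEC =====
def Spec_assign_crew_to_tasks_py (tasks : List String) (crew_assignments : List (String × String)) (out : List (String × List String)) : Prop := out = assign_crew_to_tasks_py_alt tasks crew_assignments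
instance (tasks : List String) (crew_assignments : List (String × String)) (out : List (String × List String)) : Decidable (Spec_assign_crew_to_tasks_py tasks crew_assignments out) := by unfold Spec_assign_crew_to_tasks_py; infer_instance

-- ===== CLAIM (what is proved, stated in full; the proofs are below) =====
def Claim_equal_assign_crew_to_tasks_py : Prop := ∀ (tasks : List String) (crew_assignments : List (String × String)), Dom_assign_crew_to_tasks_py tasks crew_assignments → Spec_assign_crew_to_tasks_py tasks crew_assignments (assign_crew_to_tasks_py tasks crew_assignments)

-- ===== LEMMAS AND PROOFS =====

-- A's per-task value: the crew of the first matching rule, else the default crew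
def pvG (task : String) : List String :=
  match pvRules.find? (fun r => pvP r task) with
  | some r => r.2
  | none => ["commander_riker"]

-- A's if/elif body is exactly 'insert the first matching rule's crew (or the default)'
theorem pv_step_eq (d : PySem.Dict String (List String)) (task : String) :
    (if PySem.Str.isIn "planning" (PySem.Str.lower task) || PySem.Str.isIn "goal" (PySem.Str.lower task) then
      d.insert task ["captain_picard"]
    else if PySem.Str.isIn "development" (PySem.Str.lower task) || PySem.Str.isIn "implementation" (PySem.Str.lower task) then
      d.insert task ["commander_riker", "geordi_la_forge"]
    else if PySem.Str.isIn "testing" (PySem.Str.lower task) || PySem.Str.isIn "quality" (PySem.Str.lower task) then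
      d.insert task ["lieutenant_worf", "counselor_troi"]
    else if PySem.Str.isIn "analytics" (PySem.Str.lower task) || PySem.Str.isIn "monitoring" (PySem.Str.lower task) then
      d.insert task ["commander_data", "dr_crusher"]
    else if PySem.Str.isIn "communication" (PySem.Str.lower task) || PySem.Str.isIn "marketing" (PySem.Str.lower task) then
      d.insert task ["lieutenant_uhura"]
    else if PySem.Str.isIn "revenue" (PySem.Str.lower task) || PySem.Str.isIn "monetization" (PySem.Str.lower task) then
      d.insert task ["quark"]
    else if PySem.Str.isIn "alex ai" (PySem.Str.lower task) || PySem.Str.isIn "knowledge" (PySem.Str.lower task) then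
      d.insert task ["captain_picard", "commander_data", "geordi_la_forge"]
    else
      d.insert task ["commander_riker"]) = d.insert task (pvG task) := by
  simp only [pvG, pvRules, pvP, List.find?, List.any_cons, List.any_nil, Bool.or_false]
  generalize (PySem.Str.isIn "planning" (PySem.Str.lower task) || PySem.Str.isIn "goal" (PySem.Str.lower task)) = b1
  generalize (PySem.Str.isIn "development" (PySem.Str.lower task) || PySem.Str.isIn "implementation" (PySem.Str.lower task)) = b2
  generalize (PySem.Str.isIn "testing" (PySem.Str.lower task) || PySem.Str.isIn "quality" (PySem.Str.lower task)) = b3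
  generalize (PySem.Str.isIn "analytics" (PySem.Str.lower task) || PySem.Str.isIn "monitoring" (PySem.Str.lower task)) = b4
  generalize (PySem.Str.isIn "communication" (PySem.Str.lower task) || PySem.Str.isIn "marketing" (PySem.Str.lower task)) = b5
  generalize (PySem.Str.isIn "revenue" (PySem.Str.lower task) || PySem.Str.isIn "monetization" (PySem.Str.lower task)) = b6
  generalize (PySem.Str.isIn "alex ai" (PySem.Str.lower task) || PySem.Str.isIn "knowledge" (PySem.Str.lower task)) = b7
  cases b1 <;> cases b2 <;> cases b3 <;> cases b4 <;> cases b5 <;> cases b6 <;> cases b7 <;> rfl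

-- getD through an 'insert each task its value' fold
theorem pvF_getD (g : String → List String) (tasks : List String) :
    ∀ (d : PySem.Dict String (List String)) (k : String),
      (tasks.foldl (fun d t => d.insert t (g t)) d).getD k [] =
        if k ∈ tasks then g k else d.getD k [] := by
  induction tasks with
  | nil => intro d k; simp
  | cons a l ih =>
    intro d k
    simp only [List.foldl_cons, ih, PySem.Dict.getD_insert, List.mem_cons]
    by_cases hl : k ∈ l <;> by_cases ha : k = a <;> simp [hl, ha]

-- getD through one overwrite pass of a single rule
theorem pvStage_getD (r : List String × List String) (tasks : List String) :
    ∀ (d : PySem.Dict String (List String)) (k : String),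
      (tasks.foldl (fun d task => if pvP r task then d.insert task r.2 else d) d).getD k [] =
        if k ∈ tasks ∧ pvP r k then r.2 else d.getD k [] := by
  induction tasks with
  | nil => intro d k; simp
  | cons a l ih =>
    intro d k
    simp only [List.foldl_cons, List.mem_cons]
    by_cases hpa : pvP r a
    · simp only [hpa, if_true, ih, PySem.Dict.getD_insert]
      by_cases hl : k ∈ l <;> by_cases ha : k = a <;> by_cases hpk : pvP r k <;>
        simp_all
    · simp only [hpa, ih]
      by_cases hl : k ∈ l <;> by_cases ha : k = a <;> by_cases hpk : pvP r k <;>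
        simp_all
    
-- one overwrite pass keeps the key list when every task is already a key
theorem pvStage_keys (r : List String × List String) (tasks : List String) :
    ∀ (d : PySem.Dict String (List String)), (∀ t ∈ tasks, t ∈ d.keys) →
      (tasks.foldl (fun d task => if pvP r task then d.insert task r.2 else d) d).keys = d.keys := by
  induction tasks with
  | nil => intro d _; rfl
  | cons a l ih =>
    intro d h
    simp only [List.foldl_cons]
    by_cases hpa : pvP r a
    · have hc : d.contains a = true := (PySem.Dict.contains_iff_mem_keys d a).mpr (h a (by simp))
      have hk : (d.insert a r.2).keys = d.keys := PySem.Dict.keys_insert_of_contains d r.2 hc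
      simp only [hpa, if_true]
      rw [ih (d.insert a r.2) (fun t ht => by rw [hk]; exact h t (by simp [ht])), hk]
    · simp only [hpa]
      exact ih d (fun t ht => h t (by simp [ht]))

-- getD through the whole reversed-rules sweep: the first matching rule (in original order) wins
theorem pvStages_getD (tasks : List String) (d : PySem.Dict String (List String)) (k : String)
    (hk : k ∈ tasks) : ∀ (L : List (List String × List String)),
      (L.reverse.foldl (fun d r => tasks.foldl (fun d task => if pvP r task then d.insert task r.2 else d) d) d).getD k [] =
        (match L.find? (fun r => pvP r k) with
         | some r => r.2
         | none => d.getD k []) := by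
  intro L
  induction L with
  | nil => rfl
  | cons r L' ih =>
    rw [List.reverse_cons, List.foldl_append]
    simp only [List.foldl_cons, List.foldl_nil, pvStage_getD, ih, List.find?]
    by_cases hp : pvP r k
    · simp [hp, hk]
    · simp [hp]

-- the reversed-rules sweep keeps the key list
theorem pvStages_keys (tasks : List String) (d : PySem.Dict String (List String))
    (h : ∀ t ∈ tasks, t ∈ d.keys) : ∀ (L : List (List String × List String)),
      (L.reverse.foldl (fun d r => tasks.foldl (fun d task => if pvP r task then d.insert task r.2 else d) d) d).keys = d.keys := by
  intro L
  induction L with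
  | nil => rfl
  | cons r L' ih =>
    rw [List.reverse_cons, List.foldl_append]
    simp only [List.foldl_cons, List.foldl_nil]
    rw [pvStage_keys r tasks _ (fun t ht => by rw [ih]; exact h t ht), ih]

-- ===== VERDICT (by name: the statement is the Claim_ definition above) =====
theorem assign_crew_to_tasks_py_spec : Claim_equal_assign_crew_to_tasks_py := by
  intro tasks crew_assignments _
  unfold Spec_assign_crew_to_tasks_py assign_crew_to_tasks_py assign_crew_to_tasks_py_alt
  have hA : (tasks.foldl (fun d task =>
      if PySem.Str.isIn "planning" (PySem.Str.lower task) || PySem.Str.isIn "goal" (PySem.Str.lower task) then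
        d.insert task ["captain_picard"]
      else if PySem.Str.isIn "development" (PySem.Str.lower task) || PySem.Str.isIn "implementation" (PySem.Str.lower task) then
        d.insert task ["commander_riker", "geordi_la_forge"]
      else if PySem.Str.isIn "testing" (PySem.Str.lower task) || PySem.Str.isIn "quality" (PySem.Str.lower task) then
        d.insert task ["lieutenant_worf", "counselor_troi"]
      else if PySem.Str.isIn "analytics" (PySem.Str.lower task) || PySem.Str.isIn "monitoring" (PySem.Str.lower task) then
        d.insert task ["commander_data", "dr_crusher"]
      else if PySem.Str.isIn "communication" (PySem.Str.lower task) || PySem.Str.isIn "marketing" (PySem.Str.lower task) then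
        d.insert task ["lieutenant_uhura"]
      else if PySem.Str.isIn "revenue" (PySem.Str.lower task) || PySem.Str.isIn "monetization" (PySem.Str.lower task) then
        d.insert task ["quark"]
      else if PySem.Str.isIn "alex ai" (PySem.Str.lower task) || PySem.Str.isIn "knowledge" (PySem.Str.lower task) then
        d.insert task ["captain_picard", "commander_data", "geordi_la_forge"]
      else
        d.insert task ["commander_riker"]) PySem.Dict.empty)
      = tasks.foldl (fun d task => d.insert task (pvG task)) PySem.Dict.empty := by
    congr 1
    funext d task
    exact pv_step_eq d task
  rw [hA]
  -- both sides are dicts with the same keys and the same values at every key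
  set dA := tasks.foldl (fun d task => d.insert task (pvG task)) PySem.Dict.empty with hdA
  set d0 := tasks.foldl (fun d task => d.insert task ["commander_riker"]) PySem.Dict.empty with hd0
  set dB := pvRules.reverse.foldl (fun d r => tasks.foldl (fun d task => if pvP r task then d.insert task r.2 else d) d) d0 with hdB
  have hkA : dA.keys = PySem.Set.update (PySem.Dict.empty : PySem.Dict String (List String)).keys tasks :=
    PySem.Dict.keys_foldl_insert tasks (fun _ t => pvG t) PySem.Dict.empty
  have hk0 : d0.keys = PySem.Set.update (PySem.Dict.empty : PySem.Dict String (List String)).keys tasks :=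
    PySem.Dict.keys_foldl_insert tasks (fun _ _ => ["commander_riker"]) PySem.Dict.empty
  have hmem0 : ∀ t ∈ tasks, t ∈ d0.keys := by
    intro t ht
    rw [hk0]
    exact (PySem.Set.mem_update _ _ _).mpr (Or.inr ht)
  have hkB : dB.keys = d0.keys := pvStages_keys tasks d0 hmem0 pvRules
  have hndA : dA.keys.Nodup :=
    PySem.Dict.nodup_keys_foldl_insert tasks (fun _ t => pvG t) PySem.Dict.empty PySem.Dict.nodup_keys_empty
  have hnd0 : d0.keys.Nodup :=
    PySem.Dict.nodup_keys_foldl_insert tasks (fun _ _ => ["commander_riker"]) PySem.Dict.empty PySem.Dict.nodup_keys_empty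
  have hndB : dB.keys.Nodup := by rw [hkB]; exact hnd0
  have hkeys : dA.keys = dB.keys := by rw [hkA, hkB, hk0]
  have hmemtasks : ∀ k ∈ dA.keys, k ∈ tasks := by
    intro k hk
    rw [hkA] at hk
    rcases (PySem.Set.mem_update _ _ _).mp hk with h | h
    · simp [PySem.Dict.keys_empty] at h
    · exact h
  have hvals : ∀ k ∈ dA.keys, dA.getD k [] = dB.getD k [] := by
    intro k hk
    have hkt : k ∈ tasks := hmemtasks k hk
    rw [hdA, hdB, pvF_getD, pvStages_getD tasks d0 k hkt pvRules]
    cases hfind : pvRules.find? (fun r => pvP r k) with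
    | some r => simp [hkt, pvG, hfind]
    | none =>
      rw [hd0, pvF_getD]
      simp [hkt, pvG, hfind]
  rw [PySem.Dict.items_eq_map_keys dA hndA [], PySem.Dict.items_eq_map_keys dB hndB [], ← hkeys]
  exact List.map_congr_left (fun k hk => by rw [hvals k hk])
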